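-- pv_equiv track=rewrite | github.com/Coding-Capybara/CodingTestWinner | week2/87390/이민아.py | solution
-- ===== SOURCE A (Python) =====
-- def solution(n, left, right):
--     arr = []
--     #1.
--     cnt = 1 #행
--     #2.
--     for i in range(n): #i = 열
--         lst = []
--         lst.append([cnt]*(i+1))
--         lst.append(list(range(cnt+1,n+1)))
--         #3.
--         arr += sum(lst, [])
--         cnt += 1
--     #4.
--     return arr[left:right+1]
-- ===== SOURCE B (Python) =====
-- def solution(n, left, right):
--     # element k of the snail matrix (flattened row-major) is max(k//n, k%n) + 1;
--     # compute it only for the requested window, with Python's slice clamping.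
--     size = n * n if n > 0 else 0
--     start = left + size if left < 0 else left
--     start = min(max(start, 0), size)
--     stop = right + 1
--     stop = stop + size if stop < 0 else stop
--     stop = min(max(stop, 0), size)
--     return [max(k // n, k % n) + 1 for k in range(start, stop)]
-- ===== Notes on version B (the rewrite author's own statement) =====
-- stated objective: faster
-- what changed: Instead of materialising the whole n*n snail matrix row by row and slicing it, B computes each requested element directly by the closed form max(k//n, k%n)+1 for k only in the clamped slice window.
import Mathlib
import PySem

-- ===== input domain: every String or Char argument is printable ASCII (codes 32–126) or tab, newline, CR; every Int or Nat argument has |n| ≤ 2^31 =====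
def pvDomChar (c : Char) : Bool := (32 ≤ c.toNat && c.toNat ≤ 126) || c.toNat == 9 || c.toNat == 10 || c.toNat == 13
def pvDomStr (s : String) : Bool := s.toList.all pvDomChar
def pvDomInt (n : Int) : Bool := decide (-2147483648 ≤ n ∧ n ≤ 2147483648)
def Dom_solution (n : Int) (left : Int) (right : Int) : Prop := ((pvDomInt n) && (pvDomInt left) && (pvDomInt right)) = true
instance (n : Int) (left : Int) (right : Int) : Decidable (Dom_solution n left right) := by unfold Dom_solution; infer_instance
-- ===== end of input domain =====

-- B replaces A's row-by-row construction of the whole n*n snail matrix by the closed form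
-- max(k//n, k%n)+1 evaluated only on the requested (slice-clamped) window: asymptotically faster.

-- ===== PORT A =====
-- one iteration of A's loop; state = (arr, cnt)
def solStep (n : Int) (st : List Int × Int) (i : Int) : List Int × Int :=
  let lst : List (List Int) :=
    [List.replicate (i + 1).toNat st.2, PySem.List.pyRange (st.2 + 1) (n + 1) 1]
  (st.1 ++ lst.flatten, st.2 + 1)

def solution (n : Int) (left : Int) (right : Int) : List Int :=
  let st := (PySem.List.pyRange 0 n 1).foldl (solStep n) ([], 1)
  PySem.List.slice st.1 (some left) (some (right + 1))

-- ===== PORT B =====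
def solution_alt (n : Int) (left : Int) (right : Int) : List Int :=
  let size : Int := if 0 < n then n * n else 0
  let start0 : Int := if left < 0 then left + size else left
  let start : Int := min (max start0 0) size
  let stop0 : Int := right + 1
  let stop1 : Int := if stop0 < 0 then stop0 + size else stop0
  let stop : Int := min (max stop1 0) size
  (PySem.List.pyRange start stop 1).map
    (fun k => max (PySem.Int.floordiv k n) (PySem.Int.mod k n) + 1)

-- ===== PRECONDITION & SPEC =====
def Spec_solution (n : Int) (left : Int) (right : Int) (out : List Int) : Prop := out = solution_alt n left right
instance (n : Int) (left : Int) (right : Int) (out : List Int) : Decidable (Spec_solution n left right out) := by unfold Spec_solution; infer_instance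

-- ===== CLAIM (what is proved, stated in full; the proofs are below) =====
def Claim_equal_solution : Prop := ∀ (n : Int) (left : Int) (right : Int), Dom_solution n left right → Spec_solution n left right (solution n left right)

-- ===== LEMMAS AND PROOFS =====

/-- the closed-form element of the flattened snail matrix -/
def snailF (n k : Int) : Int := max (PySem.Int.floordiv k n) (PySem.Int.mod k n) + 1

/-- row `i` of A's matrix (cnt = i+1) -/
def rowL (n : Int) (i : Nat) : List Int :=
  List.replicate ((i : Int) + 1).toNat ((i : Int) + 1) ++ PySem.List.pyRange ((i : Int) + 2) (n + 1) 1

theorem foldA (n : Int) (m : Nat) :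
    List.foldl (solStep n) ([], 1) (List.map (fun k : Nat => (k : Int)) (List.range m))
      = ((List.range m).flatMap (rowL n), (m : Int) + 1) := by
  induction m with
  | zero => simp
  | succ m ih =>
    rw [List.range_succ, List.map_append, List.foldl_append, ih, List.flatMap_append]
    simp [solStep, rowL]
    ring_nf

theorem row_eq (n : Int) (i : Nat) (hi : (i : Int) < n) :
    rowL n i = (PySem.List.pyRange ((i : Int) * n) ((i : Int) * n + n) 1).map (snailF n) := by
  have hfd : ∀ j : Nat, (j : Int) < n →
      PySem.Int.floordiv ((i : Int) * n + (j : Int)) n = (i : Int) := by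
    intro j hj
    rw [PySem.Int.floordiv_eq_iff_of_pos (by omega : (0:Int) < n)]
    constructor <;> nlinarith [Int.natCast_nonneg j, Int.natCast_nonneg i]
  have hmd : ∀ j : Nat, (j : Int) < n →
      PySem.Int.mod ((i : Int) * n + (j : Int)) n = (j : Int) := by
    intro j hj
    have := PySem.Int.floordiv_mul_add_mod ((i : Int) * n + (j : Int)) n
    rw [hfd j hj] at this
    omega
  rw [rowL, PySem.List.pyRange_one, PySem.List.pyRange_one]
  apply List.ext_getElem
  · simp
    omega
  · intro j h1 h2
    simp only [List.getElem_append, List.getElem_replicate, List.getElem_map,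
      List.getElem_range, List.length_replicate]
    have hj : (j : Int) < n := by
      simp at h2
      omega
    split_ifs with hsp <;> rw [snailF, hfd j hj, hmd j hj] <;> omega

theorem rows_eq (n : Int) (hn : 0 < n) (m : Nat) (hm : (m : Int) ≤ n) :
    (List.range m).flatMap (rowL n) = (PySem.List.pyRange 0 ((m : Int) * n) 1).map (snailF n) := by
  induction m with
  | zero => simp [PySem.List.pyRange]
  | succ m ih =>
    have hm1 : (m : Int) < n := by push_cast at hm; omega
    rw [List.range_succ, List.flatMap_append, ih hm1.le]
    simp only [List.flatMap_cons, List.flatMap_nil, List.append_nil]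
    rw [row_eq n m hm1, ← List.map_append,
      ← PySem.List.pyRange_one_append 0 ((m : Int) * n) ((m : Int) * n + n)
        (by nlinarith [Int.natCast_nonneg m]) (by linarith)]
    congr 2
    push_cast
    ring

theorem clamp_eq (s : Nat) (a : Int) :
    (PySem.List.clampIdx s a : Int) = min (max (if a < 0 then a + (s : Int) else a) 0) (s : Int) := by
  simp only [PySem.List.clampIdx]
  split_ifs <;> push_cast <;> omega

theorem slice_map_range (g : Int → Int) (s : Nat) (a b : Int) :
    PySem.List.slice ((List.range s).map (fun k : Nat => g (k : Int))) (some a) (some b)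
      = (PySem.List.pyRange (min (max (if a < 0 then a + (s : Int) else a) 0) (s : Int))
          (min (max (if b < 0 then b + (s : Int) else b) 0) (s : Int)) 1).map g := by
  have hca := clamp_eq s a
  have hcb := clamp_eq s b
  simp only [PySem.List.slice, List.length_map, List.length_range]
  rw [PySem.List.pyRange_one, List.map_map]
  apply List.ext_getElem
  · simp
    omega
  · intro j h1 h2
    simp only [List.getElem_take, List.getElem_drop, List.getElem_map, List.getElem_range,
      Function.comp_apply]
    congr 1
    simp only [List.length_take, List.length_drop, List.length_map, List.length_range] at h1
    omega

theorem main_eq (n left right : Int) : solution n left right = solution_alt n left right := by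
  by_cases hn : 0 < n
  · unfold solution solution_alt
    have hrange : PySem.List.pyRange 0 n 1 = List.map (fun k : Nat => (k : Int)) (List.range n.toNat) := by
      rw [PySem.List.pyRange_one]
      simp
    rw [hrange, foldA, rows_eq n hn n.toNat (by omega)]
    have hsz : ((n.toNat : Int)) * n = n * n := by
      rw [Int.toNat_of_nonneg hn.le]
    rw [hsz]
    have hL : (PySem.List.pyRange 0 (n * n) 1).map (snailF n)
        = (List.range ((n * n).toNat)).map (fun k : Nat => snailF n (k : Int)) := by
      rw [PySem.List.pyRange_one, List.map_map]
      simp [Function.comp]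
    have hnn : ((n * n).toNat : Int) = n * n := by
      have : 0 ≤ n * n := by positivity
      omega
    simp only [hL, if_pos hn]
    rw [show (fun k => max (PySem.Int.floordiv k n) (PySem.Int.mod k n) + 1) = snailF n from rfl]
    rw [slice_map_range (snailF n) ((n * n).toNat) left (right + 1), hnn]
  · unfold solution solution_alt
    have h0 : (n - 0).toNat = 0 := by omega
    rw [PySem.List.pyRange_one, h0]
    simp only [List.range_zero, List.map_nil, List.foldl_nil, if_neg hn]
    have hA : min (max (if left < 0 then left + 0 else left) 0) 0 = 0 := by
      split_ifs <;> omega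
    have hB : min (max (if right + 1 < 0 then right + 1 + 0 else right + 1) 0) 0 = 0 := by
      split_ifs <;> omega
    rw [hA, hB]
    simp [PySem.List.slice, PySem.List.pyRange]

-- ===== VERDICT (by name: the statement is the Claim_ definition above) =====
theorem solution_spec : Claim_equal_solution := by
  intro n left right _
  unfold Spec_solution
  exact main_eq n left right
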